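-- pv_equiv track=rewrite | github.com/sdubee10/Problem-Solving | 1차원 배열 탐색/가장 높은 증가수열.py | solution
-- ===== SOURCE A (Python) =====
-- def solution(nums):
--     answer = []
--     n = len(nums)
--     for i in range(n):
--         tmp = []
--         tmp.append(nums[i])
--         while(i + 1 < n and nums[i] < nums[i+1]):
--             tmp.append(nums[i+1])
--             i += 1
--         if len(tmp) != 1:
--             answer.append(tmp)
--
--     diff = max(answer[0]) - min(answer[0])
--
--     for i in range(1, len(answer)):
--         tmp = max(answer[i]) - min(answer[i])
--         diff = max(diff, tmp)
--
--     return diff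
-- ===== SOURCE B (Python) =====
-- def solution(nums):
--     # One pass: track the start value of the current strictly-increasing run
--     # and the best (last - first) difference seen over complete runs so far.
--     # Raises (like A) when the list has no adjacent increasing pair.
--     if not nums:
--         raise ValueError("no increasing run")
--     best = None
--     prev = m = nums[0]
--     for x in nums[1:]:
--         if prev < x:
--             d = x - m
--             if best is None or d > best:
--                 best = d
--         else:
--             m = x
--         prev = x
--     if best is None:
--         raise ValueError("no increasing run")
--     return best
-- ===== Notes on version B (the rewrite author's own statement) =====
-- stated objective: faster
-- what changed: Replaced A's quadratic scheme (restart a run-walk at every index, store all overlapping runs, then a second max/min pass over them) by a single left-to-right pass that tracks the start of the current increasing run and the best last-minus-first difference.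
import Mathlib
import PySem

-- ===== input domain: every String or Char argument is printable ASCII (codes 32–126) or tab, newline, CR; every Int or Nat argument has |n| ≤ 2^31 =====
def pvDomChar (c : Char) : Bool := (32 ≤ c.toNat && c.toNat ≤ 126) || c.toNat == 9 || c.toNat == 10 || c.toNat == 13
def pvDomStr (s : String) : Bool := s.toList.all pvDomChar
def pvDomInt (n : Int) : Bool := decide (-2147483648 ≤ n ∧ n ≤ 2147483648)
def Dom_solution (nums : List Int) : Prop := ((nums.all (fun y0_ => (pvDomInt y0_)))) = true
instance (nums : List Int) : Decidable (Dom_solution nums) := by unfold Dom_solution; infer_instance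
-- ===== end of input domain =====

-- B replaces A's quadratic overlapping-run collection + second max/min pass by one
-- linear pass tracking the current run's start and the best (last - first) difference.

-- ===== PORT A =====
-- inner `while i + 1 < n and nums[i] < nums[i+1]: tmp.append(nums[i+1]); i += 1`
def aWhile (nums : List Int) (n i : Int) (tmp : List Int) : List Int × Int :=
  if i + 1 < n ∧ PySem.List.pyGetD nums i 0 < PySem.List.pyGetD nums (i + 1) 0 then
    aWhile nums n (i + 1) (tmp ++ [PySem.List.pyGetD nums (i + 1) 0])
  else (tmp, i)
termination_by (n - i).toNat
decreasing_by omega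

-- body of the first `for i in range(n)` loop
def aStep (nums : List Int) (n : Int) (answer : List (List Int)) (i : Int) : List (List Int) :=
  let tmp : List Int := [] ++ [PySem.List.pyGetD nums i 0]
  let r := aWhile nums n i tmp
  if r.1.length ≠ 1 then answer ++ [r.1] else answer

-- body of the second `for i in range(1, len(answer))` loop
def aDiffStep (answer : List (List Int)) (diff : Int) (i : Int) : Int :=
  let ai := PySem.List.pyGetD answer i []
  let tmp := ((PySem.List.max? ai (fun y => y)).getD 0) - ((PySem.List.min? ai (fun y => y)).getD 0)
  max diff tmp

def solution (nums : List Int) : Int :=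
  let n : Int := (nums.length : Int)
  let answer : List (List Int) := (PySem.List.pyRange 0 n 1).foldl (aStep nums n) []
  -- `answer[0]` raises IndexError when answer is empty — exactly what Pre_solution excludes
  let a0 := PySem.List.pyGetD answer 0 []
  let diff := ((PySem.List.max? a0 (fun y => y)).getD 0) - ((PySem.List.min? a0 (fun y => y)).getD 0)
  (PySem.List.pyRange 1 (answer.length : Int) 1).foldl (aDiffStep answer) diff

-- ===== PORT B =====
def solution_alt (nums : List Int) : Int :=
  match nums with
  | [] => 0      -- Python B raises ValueError here — excluded by Pre_solution
  | x :: rest =>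
    let res := rest.foldl
      (fun (s : Option Int × Int × Int) y =>
        let best := s.1; let prev := s.2.1; let m := s.2.2
        if prev < y then
          let d := y - m
          ((match best with
            | none => some d
            | some b => if d > b then some d else some b), y, m)
        else (best, y, y)) (none, x, x)
    -- Python B raises ValueError when best is still None — excluded by Pre_solution
    (res.1).getD 0

-- ===== PRECONDITION & SPEC =====
-- Pre_ excludes exactly the inputs with no adjacent increasing pair: there A raises
-- IndexError (answer[0] of an empty list) and B raises ValueError.
def Pre_solution (nums : List Int) : Prop := ∃ p ∈ nums.zip nums.tail, p.1 < p.2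
instance (nums : List Int) : Decidable (Pre_solution nums) := by unfold Pre_solution; infer_instance

def pvWitness_solution : List Int := [1, 3, 2]

def Spec_solution (nums : List Int) (out : Int) : Prop := out = solution_alt nums
instance (nums : List Int) (out : Int) : Decidable (Spec_solution nums out) := by unfold Spec_solution; infer_instance

-- ===== CLAIM (what is proved, stated in full; the proofs are below) =====
def Claim_equal_solution : Prop := ∀ (nums : List Int), Dom_solution nums → Pre_solution nums → Spec_solution nums (solution nums)

-- ===== LEMMAS AND PROOFS =====

-- last value of the strictly increasing run continuing from x into l
def walk : Int → List Int → Int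
  | x, [] => x
  | x, y :: r => if x < y then walk y r else x

-- the values after x that A's inner while loop appends
def runL : Int → List Int → List Int
  | _, [] => []
  | x, y :: r => if x < y then y :: runL y r else []

-- structural form of A's `answer`
def ansL : List Int → List (List Int)
  | [] => []
  | x :: r => if runL x r = [] then ansL r else (x :: runL x r) :: ansL r

-- the (last - first) differences of A's runs
def runDiffs : List Int → List Int
  | [] => []
  | x :: r => if runL x r = [] then runDiffs r else (walk x r - x) :: runDiffs r

-- max(ai) - min(ai), as A's second loop computes it
def fDiff (ai : List Int) : Int :=
  ((PySem.List.max? ai (fun y => y)).getD 0) - ((PySem.List.min? ai (fun y => y)).getD 0)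

-- max on Option Int, none = identity
def omax : Option Int → Option Int → Option Int
  | none, b => b
  | a, none => a
  | some a, some b => some (max a b)

def omaxList : List Int → Option Int
  | [] => none
  | x :: t => some (t.foldl max x)

-- diff contributed by the run starting at the current position (B's view)
def runDiffFrom : Int → Int → List Int → Option Int
  | _, _, [] => none
  | prev, m, y :: r => if prev < y then some (walk y r - m) else none

def ga : List Int → Option Int
  | [] => none
  | x :: r => omax (runDiffFrom x x r) (ga r)

theorem pyGetD_at (xs : List Int) (i : Int) (k : Nat) (hik : i = (k : Int)) (hk : k < xs.length) :
    PySem.List.pyGetD xs i 0 = xs[k] := by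
  subst hik
  rw [PySem.List.pyGetD_natCast]
  exact List.getD_eq_getElem xs 0 hk

theorem walk_le (r : List Int) : ∀ x : Int, x ≤ walk x r := by
  induction r with
  | nil => intro x; simp [walk]
  | cons y r ih =>
    intro x; simp only [walk]
    split
    · exact le_trans (le_of_lt (by assumption)) (ih y)
    · exact le_refl x

theorem omax_none_right (a : Option Int) : omax a none = a := by cases a <;> rfl

theorem omax_assoc (a b c : Option Int) : omax (omax a b) c = omax a (omax b c) := by
  cases a <;> cases b <;> cases c <;> simp [omax, max_assoc]

theorem omax_absorb (d e : Int) (hde : d ≤ e) (g : Option Int) :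
    omax (some d) (omax (some e) g) = omax (some e) g := by
  rw [← omax_assoc]
  simp [omax, max_eq_right hde]

theorem omax_absorb' (d e : Int) (hde : d ≤ e) (g : Option Int) :
    omax (some e) (omax (some d) g) = omax (some e) g := by
  rw [← omax_assoc]
  simp [omax, max_eq_left hde]

theorem foldl_max_init (t : List Int) : ∀ a b : Int, t.foldl max (max a b) = max a (t.foldl max b) := by
  induction t with
  | nil => intro a b; rfl
  | cons c t ih =>
    intro a b
    simp only [List.foldl_cons, max_assoc]
    exact ih a (max b c)

theorem omaxList_cons (d : Int) (t : List Int) : omaxList (d :: t) = omax (some d) (omaxList t) := by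
  cases t with
  | nil => rfl
  | cons e t => simp only [omaxList, omax, List.foldl_cons, foldl_max_init]

theorem ga_eq_omaxList_runDiffs (l : List Int) : ga l = omaxList (runDiffs l) := by
  induction l with
  | nil => rfl
  | cons x r ih =>
    simp only [ga, runDiffs, ih]
    cases r with
    | nil => simp [runDiffFrom, runL, omax]
    | cons y r' =>
      by_cases h : x < y
      · simp [runDiffFrom, runL, walk, h, omaxList_cons]
      · simp [runDiffFrom, runL, h, omax]

-- A's inner while loop appends exactly runL nums[k] (drop (k+1))
theorem aWhile_spec (nums : List Int) : ∀ (k : Nat) (tmp : List Int) (hk : k < nums.length),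
    (aWhile nums (nums.length : Int) (k : Int) tmp).1 = tmp ++ runL (nums[k]'hk) (nums.drop (k + 1)) := by
  have H : ∀ (fuel k : Nat) (tmp : List Int), nums.length - k ≤ fuel → ∀ (hk : k < nums.length),
      (aWhile nums (nums.length : Int) (k : Int) tmp).1 = tmp ++ runL (nums[k]'hk) (nums.drop (k + 1)) := by
    intro fuel
    induction fuel with
    | zero => intro k tmp hf hk; omega
    | succ fuel ih =>
      intro k tmp hf hk
      rw [aWhile]
      by_cases h1 : k + 1 < nums.length
      · have hd : nums.drop (k + 1) = nums[k + 1] :: nums.drop (k + 2) :=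
          List.drop_eq_getElem_cons h1
        by_cases h2 : nums[k] < nums[k + 1]
        · have hcond : ((k : Int) + 1 < (nums.length : Int) ∧
              PySem.List.pyGetD nums (k : Int) 0 < PySem.List.pyGetD nums ((k : Int) + 1) 0) := by
            constructor
            · exact_mod_cast h1
            · rw [pyGetD_at nums _ k rfl hk, pyGetD_at nums _ (k + 1) (by push_cast; ring) h1]
              exact h2
          rw [if_pos hcond]
          have e2 := pyGetD_at nums ((k : Int) + 1) (k + 1) (by push_cast; ring) h1
          have hcast : ((k : Int) + 1) = ((k + 1 : Nat) : Int) := by push_cast; ring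
          rw [e2, hcast, ih (k + 1) (tmp ++ [nums[k + 1]]) (by omega) h1]
          rw [hd]
          simp [runL, h2, List.append_assoc]
        · rw [if_neg]
          · rw [hd]
            simp [runL, h2]
          · intro hc
            apply h2
            rw [pyGetD_at nums _ k rfl hk, pyGetD_at nums _ (k + 1) (by push_cast; ring) h1] at hc
            exact hc.2
      · rw [if_neg]
        · have : nums.drop (k + 1) = [] := List.drop_of_length_le (by omega)
          simp [this, runL]
        · intro hc
          have : (k : Int) + 1 < (nums.length : Int) := hc.1
          omega
  intro k tmp hk
  exact H (nums.length - k) k tmp (le_refl _) hk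

-- the outer for-loop over indices builds ansL
theorem outer_fold (nums : List Int) : ∀ (fuel k : Nat) (acc : List (List Int)),
    nums.length - k ≤ fuel →
    (PySem.List.pyRange (k : Int) (nums.length : Int) 1).foldl
      (aStep nums (nums.length : Int)) acc
    = acc ++ ansL (nums.drop k) := by
  intro fuel
  induction fuel with
  | zero =>
    intro k acc hf
    have hk : nums.length ≤ k := by omega
    rw [PySem.List.pyRange_one_eq_nil (by exact_mod_cast hk)]
    simp [List.drop_of_length_le hk, ansL]
  | succ fuel ih =>
    intro k acc hf
    by_cases hk : k < nums.length
    · rw [PySem.List.pyRange_one_cons (by exact_mod_cast hk)]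
      rw [List.foldl_cons]
      have hcast : ((k : Int) + 1) = ((k + 1 : Nat) : Int) := by push_cast; ring
      rw [hcast, ih (k + 1) _ (by omega)]
      have e1 := pyGetD_at nums (k : Int) k rfl hk
      have hdk : nums.drop k = nums[k] :: nums.drop (k + 1) := List.drop_eq_getElem_cons hk
      simp only [aStep, e1, aWhile_spec nums k _ hk]
      rw [hdk]
      simp only [ansL]
      by_cases hr : runL nums[k] (nums.drop (k + 1)) = []
      · simp [hr]
      · have : ([] ++ [nums[k]] ++ runL nums[k] (nums.drop (k + 1))).length ≠ 1 := by
          simp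
          intro h
          exact hr h
        simp only [if_pos this, if_neg hr]
        simp [List.append_assoc]
    · rw [PySem.List.pyRange_one_eq_nil (by exact_mod_cast (by omega : nums.length ≤ k))]
      simp [List.drop_of_length_le (by omega : nums.length ≤ k), ansL]

-- min/max of a run: runs are increasing, so max - min = walk x r - x
theorem foldl_max_runL (r : List Int) : ∀ x : Int, (runL x r).foldl max x = walk x r := by
  induction r with
  | nil => intro x; rfl
  | cons y r ih =>
    intro x
    simp only [runL, walk]
    by_cases h : x < y
    · simp only [if_pos h, List.foldl_cons, max_eq_right (le_of_lt h), ih]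
    · simp [if_neg h]

theorem foldl_min_runL (r : List Int) : ∀ x c : Int, c ≤ x → (runL x r).foldl min c = c := by
  induction r with
  | nil => intro x c _; rfl
  | cons y r ih =>
    intro x c hc
    simp only [runL]
    by_cases h : x < y
    · simp only [if_pos h, List.foldl_cons, min_eq_left (le_of_lt (lt_of_le_of_lt hc h))]
      exact ih y c (le_of_lt (lt_of_le_of_lt hc h))
    · simp [if_neg h]

theorem run_f (x : Int) (r : List Int) : fDiff (x :: runL x r) = walk x r - x := by
  unfold fDiff
  rw [PySem.List.max?_id_cons, PySem.List.min?_id_cons]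
  simp [foldl_max_runL, foldl_min_runL r x x (le_refl x)]

-- the diffs A computes over its answer list
theorem map_f_ansL (l : List Int) : (ansL l).map fDiff = runDiffs l := by
  induction l with
  | nil => rfl
  | cons x r ih =>
    simp only [ansL, runDiffs]
    by_cases h : runL x r = []
    · simp [h, ih]
    · simp only [if_neg h, List.map_cons, ih, run_f]

theorem pre_runDiffs_ne (l : List Int) : Pre_solution l → runDiffs l ≠ [] := by
  induction l with
  | nil => intro h; exact absurd h (by simp [Pre_solution])
  | cons x r ih =>
    intro h
    simp only [runDiffs]
    cases r with
    | nil => exact absurd h (by simp [Pre_solution])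
    | cons y r' =>
      by_cases hxy : x < y
      · have : runL x (y :: r') ≠ [] := by simp [runL, hxy]
        simp [this]
      · have hpre : Pre_solution (y :: r') := by
          obtain ⟨p, hp, hlt⟩ := h
          simp only [List.tail_cons, List.zip_cons_cons, List.mem_cons] at hp
          rcases hp with rfl | hp
          · exact absurd hlt hxy
          · exact ⟨p, hp, hlt⟩
        have hr : runL x (y :: r') = [] := by simp [runL, hxy]
        simpa [hr] using ih hpre

theorem push_eq_omax (best : Option Int) (d : Int) :
    (match best with
      | none => some d
      | some b => if d > b then some d else some b) = omax best (some d) := by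
  cases best with
  | none => rfl
  | some b =>
    simp only [omax]
    by_cases h : d > b
    · simp [h, max_eq_right (le_of_lt h)]
    · simp [h, max_eq_left (le_of_not_gt h)]

-- bridge: B's fold equals the structural maximum ga
theorem bridge (l : List Int) : ∀ (best : Option Int) (prev m : Int), m ≤ prev →
    (l.foldl
      (fun (s : Option Int × Int × Int) y =>
        let best := s.1; let prev := s.2.1; let m := s.2.2
        if prev < y then
          let d := y - m
          ((match best with
            | none => some d
            | some b => if d > b then some d else some b), y, m)
        else (best, y, y)) (best, prev, m)).1
    = omax best (omax (runDiffFrom prev m l) (ga l)) := by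
  induction l with
  | nil => intro best prev m _; simp [runDiffFrom, ga, omax_none_right]
  | cons x r ih =>
    intro best prev m hm
    simp only [List.foldl_cons]
    by_cases hpx : prev < x
    · simp only [if_pos hpx]
      rw [ih _ x m (le_of_lt (lt_of_le_of_lt hm hpx))]
      rw [push_eq_omax, omax_assoc]
      congr 1
      simp only [runDiffFrom, if_pos hpx, ga]
      cases r with
      | nil => simp [walk, ga, omax]
      | cons y r' =>
        simp only [walk]
        by_cases hxy : x < y
        · simp only [if_pos hxy]
          have hW : x ≤ walk y r' := le_trans (le_of_lt hxy) (walk_le r' y)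
          rw [omax_absorb (x - m) (walk y r' - m) (by omega)]
          rw [omax_absorb' (walk y r' - x) (walk y r' - m) (by omega)]
        · simp [if_neg hxy, omax]
    · simp only [if_neg hpx]
      rw [ih best x x (le_refl x)]
      simp only [runDiffFrom, if_neg hpx, ga, omax]

-- B's port computes ga
theorem alt_eq_ga (x : Int) (r : List Int) : solution_alt (x :: r) = (ga (x :: r)).getD 0 := by
  simp only [solution_alt]
  rw [bridge r none x x (le_refl x)]
  simp only [ga, omax]

-- A's port computes the maximum of the run differences
theorem a_eq (nums : List Int) (hpre : Pre_solution nums) :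
    solution nums = (omaxList (runDiffs nums)).getD 0 := by
  have hne := pre_runDiffs_ne nums hpre
  simp only [solution]
  have hout := outer_fold nums nums.length 0 [] (by omega)
  simp only [Nat.cast_zero, List.drop_zero, List.nil_append] at hout
  rw [hout]
  obtain ⟨e, T, hL⟩ : ∃ e T, ansL nums = e :: T := by
    have hmap := map_f_ansL nums
    cases h : ansL nums with
    | nil => rw [h] at hmap; simp at hmap; exact absurd hmap hne
    | cons e T => exact ⟨e, T, rfl⟩
  rw [hL]
  rw [show aDiffStep (e :: T) = fun d i => max d (fDiff (PySem.List.pyGetD (e :: T) i [])) from rfl]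
  rw [PySem.List.foldl_pyRange_pyGetD' (e :: T) [] (fun d v => max d (fDiff v)) _ (by omega : (0:Int) ≤ 1)]
  simp only [PySem.List.pyGetD_zero_cons, Int.toNat_one, List.drop_one, List.tail_cons]
  have hmap := map_f_ansL nums
  rw [hL] at hmap
  show T.foldl (fun d v => max d (fDiff v)) (fDiff e) = _
  rw [← List.foldl_map]
  rw [← hmap]
  simp [omaxList]

-- ===== VERDICT (by name: the statement is the Claim_ definition above) =====
theorem solution_spec : Claim_equal_solution := by
  intro nums _ hpre
  unfold Spec_solution
  cases nums with
  | nil => exact absurd hpre (by simp [Pre_solution])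
  | cons x0 rest =>
    rw [alt_eq_ga, ga_eq_omaxList_runDiffs, a_eq (x0 :: rest) hpre]
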